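-- pv_equiv track=rewrite | github.com/abigailhaddad/named_entity_recognition | analyze.py | find_missing_substrings
-- ===== SOURCE A (Python) =====
-- def find_missing_substrings(top_5, new_list):
--     missing_items = []
--     for item in top_5:
--         found = False
--         for new_item in new_list:
--             if item in new_item:
--                 found = True
--                 break
--         if not found:
--             missing_items.append(item)
--     return missing_items
-- ===== SOURCE B (Python) =====
-- def find_missing_substrings(top_5, new_list):
--     # Inverted traversal: one pass over new_list, filtering down the
--     # surviving candidates; found items drop out and are never re-tested.
--     remaining = top_5
--     for new_item in new_list:
--         remaining = [item for item in remaining if item not in new_item]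
--     return remaining
-- ===== Notes on version B (the rewrite author's own statement) =====
-- stated objective: alternative
-- what changed: Loop order inverted: instead of scanning new_list for each item, B makes one pass over new_list and maintains the shrinking list of still-missing candidates, so an item found early is never tested against later entries.
import Mathlib
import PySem

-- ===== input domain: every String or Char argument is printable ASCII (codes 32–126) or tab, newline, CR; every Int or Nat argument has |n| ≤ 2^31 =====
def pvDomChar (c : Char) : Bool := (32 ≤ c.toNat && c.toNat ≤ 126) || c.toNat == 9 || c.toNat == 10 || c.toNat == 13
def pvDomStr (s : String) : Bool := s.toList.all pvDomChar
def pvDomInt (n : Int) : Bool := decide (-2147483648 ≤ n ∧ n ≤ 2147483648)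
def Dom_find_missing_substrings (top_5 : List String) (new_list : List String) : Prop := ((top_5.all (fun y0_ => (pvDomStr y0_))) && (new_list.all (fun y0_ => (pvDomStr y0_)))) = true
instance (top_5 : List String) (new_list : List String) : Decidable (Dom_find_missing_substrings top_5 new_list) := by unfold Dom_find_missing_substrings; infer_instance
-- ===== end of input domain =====

-- B inverts the traversal: one pass over new_list filtering the shrinking list of
-- still-missing candidates, instead of scanning new_list afresh for every item.


-- ===== PORT A =====
-- inner 'for new_item in new_list: if item in new_item: found = True; break'
def pvFoundA (new_list : List String) (item : String) : Bool :=
  match new_list with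
  | [] => false
  | n :: ns => if PySem.Str.isIn item n then true else pvFoundA ns item

def find_missing_substrings (top_5 : List String) (new_list : List String) : List String :=
  top_5.foldl (fun missing_items item =>
    if pvFoundA new_list item then missing_items else missing_items ++ [item]) []

-- ===== PORT B =====
def find_missing_substrings_alt (top_5 : List String) (new_list : List String) : List String :=
  new_list.foldl (fun remaining new_item =>
    remaining.filter (fun item => !PySem.Str.isIn item new_item)) top_5

-- ===== PRECONDITION & SPEC =====
def Spec_find_missing_substrings (top_5 : List String) (new_list : List String) (out : List String) : Prop := out = find_missing_substrings_alt top_5 new_list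
instance (top_5 : List String) (new_list : List String) (out : List String) : Decidable (Spec_find_missing_substrings top_5 new_list out) := by unfold Spec_find_missing_substrings; infer_instance

-- ===== CLAIM (what is proved, stated in full; the proofs are below) =====
def Claim_equal_find_missing_substrings : Prop := ∀ (top_5 : List String) (new_list : List String), Dom_find_missing_substrings top_5 new_list → Spec_find_missing_substrings top_5 new_list (find_missing_substrings top_5 new_list)

-- ===== LEMMAS AND PROOFS =====

-- A's inner loop is 'any'
theorem pvFoundA_eq_any (new_list : List String) (item : String) :
    pvFoundA new_list item = new_list.any (fun n => PySem.Str.isIn item n) := by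
  induction new_list with
  | nil => rfl
  | cons n ns ih => by_cases h : PySem.Str.isIn item n = true <;> simp [pvFoundA, ih]

-- foldl with 'append in the else branch' is a filter (accumulator generalized)
theorem foldl_skip_if (p : String → Bool) (l acc : List String) :
    l.foldl (fun m i => if p i then m else m ++ [i]) acc
      = acc ++ l.filter (fun i => !p i) := by
  induction l generalizing acc with
  | nil => simp
  | cons x xs ih =>
    by_cases h : p x = true <;> simp [List.foldl_cons, h, ih]

-- A is a filter over top_5
theorem portA_eq_filter (top_5 new_list : List String) :
    find_missing_substrings top_5 new_list
      = top_5.filter (fun item => !new_list.any (fun n => PySem.Str.isIn item n)) := by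
  unfold find_missing_substrings
  rw [foldl_skip_if]
  simp [pvFoundA_eq_any]

-- B is the same filter
theorem portB_eq_filter (top_5 new_list : List String) :
    find_missing_substrings_alt top_5 new_list
      = top_5.filter (fun item => !new_list.any (fun n => PySem.Str.isIn item n)) := by
  unfold find_missing_substrings_alt
  induction new_list generalizing top_5 with
  | nil => simp
  | cons n ns ih =>
    simp only [List.foldl_cons, ih, List.filter_filter]
    congr 1
    funext item
    simp [List.any_cons, Bool.and_comm]

-- ===== VERDICT (by name: the statement is the Claim_ definition above) =====
theorem find_missing_substrings_spec : Claim_equal_find_missing_substrings := by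
  intro top_5 new_list _
  unfold Spec_find_missing_substrings
  rw [portA_eq_filter, portB_eq_filter]
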